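-- pv_equiv track=rewrite | github.com/wesleyd/aoc23 | day23b.py | dict_peek
-- ===== SOURCE A (Python) =====
-- def dict_peek(d, n):
--     if n < 0:
--         n = -1-n
--         d = reversed(d)
--     for x in d:
--         if n == 0:
--             return x
--         n -= 1
-- ===== SOURCE B (Python) =====
-- def dict_peek(d, n):
--     keys = list(d)
--     if -len(keys) <= n < len(keys):
--         return keys[n]
--     return None
-- ===== Notes on version B (the rewrite author's own statement) =====
-- stated objective: simpler
-- what changed: Replaces A's countdown loop with sign-dependent reversal by materializing the key list once and using Python's native negative-aware indexing under a single bounds check.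
import Mathlib
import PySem

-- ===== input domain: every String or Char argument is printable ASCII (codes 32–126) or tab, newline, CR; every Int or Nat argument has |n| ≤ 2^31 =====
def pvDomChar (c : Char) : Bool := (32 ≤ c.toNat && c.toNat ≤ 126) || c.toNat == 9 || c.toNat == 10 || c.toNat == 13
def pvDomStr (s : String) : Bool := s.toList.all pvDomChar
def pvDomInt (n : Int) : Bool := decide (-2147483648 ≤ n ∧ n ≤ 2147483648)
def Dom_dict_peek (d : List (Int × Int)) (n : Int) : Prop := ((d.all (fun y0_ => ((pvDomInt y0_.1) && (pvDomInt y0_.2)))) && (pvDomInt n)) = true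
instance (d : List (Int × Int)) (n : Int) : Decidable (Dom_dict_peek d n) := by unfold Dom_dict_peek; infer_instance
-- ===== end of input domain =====

-- B replaces A's countdown loop (with reversal and index remap for negative n) by one
-- native negative-aware list index under a single bounds check; objective: simpler.

-- ===== PORT A =====
-- the 'for x in d: if n == 0: return x; n -= 1' loop, over the dict's keys
def dictPeekLoop : List Int → Int → Option Int
  | [], _ => none
  | x :: xs, n => if n = 0 then some x else dictPeekLoop xs (n - 1)

def dict_peek (d : List (Int × Int)) (n : Int) : Option Int :=
  let keys := d.map Prod.fst
  if n < 0 then dictPeekLoop keys.reverse (-1 - n)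
  else dictPeekLoop keys n

-- ===== PORT B =====
def dict_peek_alt (d : List (Int × Int)) (n : Int) : Option Int :=
  let keys := d.map Prod.fst
  if -(keys.length : Int) ≤ n ∧ n < (keys.length : Int) then
    PySem.List.pyGet? keys n
  else none

-- ===== PRECONDITION & SPEC =====
def Spec_dict_peek (d : List (Int × Int)) (n : Int) (out : Option Int) : Prop := out = dict_peek_alt d n
instance (d : List (Int × Int)) (n : Int) (out : Option Int) : Decidable (Spec_dict_peek d n out) := by unfold Spec_dict_peek; infer_instance

-- ===== CLAIM (what is proved, stated in full; the proofs are below) =====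
def Claim_equal_dict_peek : Prop := ∀ (d : List (Int × Int)) (n : Int), Dom_dict_peek d n → Spec_dict_peek d n (dict_peek d n)

-- ===== LEMMAS AND PROOFS =====

-- A's loop on a nonnegative countdown is list indexing.
theorem dictPeekLoop_eq (xs : List Int) (n : Int) (hn : 0 ≤ n) :
    dictPeekLoop xs n = xs[n.toNat]? := by
  induction xs generalizing n with
  | nil => simp [dictPeekLoop]
  | cons x xs ih =>
    by_cases h : n = 0
    · subst h; simp [dictPeekLoop]
    · have h1 : 0 ≤ n - 1 := by omega
      have h2 : n.toNat = (n - 1).toNat + 1 := by omega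
      rw [show dictPeekLoop (x :: xs) n = dictPeekLoop xs (n - 1) from by
            simp [dictPeekLoop, h],
          ih (n - 1) h1, h2]
      simp

theorem dict_peek_spec : Claim_equal_dict_peek := by
  unfold Claim_equal_dict_peek Spec_dict_peek
  intro d n _
  unfold dict_peek dict_peek_alt
  set keys := d.map Prod.fst with hkeys
  by_cases hneg : n < 0
  · rw [if_pos hneg, dictPeekLoop_eq _ _ (by omega)]
    by_cases hin : -(keys.length : Int) ≤ n
    · have hb : -(keys.length : Int) ≤ n ∧ n < (keys.length : Int) := ⟨hin, by omega⟩
      rw [if_pos hb]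
      have hR : PySem.List.pyGet? keys n = keys[keys.length - (-n).toNat]? := by
        conv_lhs => rw [show n = -(((-n).toNat : Nat) : Int) from by omega]
        exact PySem.List.pyGet?_neg_natCast keys _ (by omega) (by omega)
      have hi : (-1 - n).toNat < keys.length := by omega
      rw [hR, List.getElem?_reverse hi]
      congr 1
      omega
    · have hb : ¬ (-(keys.length : Int) ≤ n ∧ n < (keys.length : Int)) := by omega
      rw [if_neg hb]
      apply List.getElem?_eq_none
      simp only [List.length_reverse]
      omega
  · rw [if_neg hneg, dictPeekLoop_eq _ _ (by omega)]
    by_cases hin : n < (keys.length : Int)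
    · have hb : -(keys.length : Int) ≤ n ∧ n < (keys.length : Int) := ⟨by omega, hin⟩
      rw [if_pos hb, PySem.List.pyGet?_of_nonneg _ (by omega)]
    · have hb : ¬ (-(keys.length : Int) ≤ n ∧ n < (keys.length : Int)) := by omega
      rw [if_neg hb]
      apply List.getElem?_eq_none
      omega
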